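-- pv_equiv track=rewrite | github.com/AnniePawl/Anna-Interview-Prep | W3/Strings/string_warmups.py | sum_str_digits2
-- ===== SOURCE A (Python) =====
-- def sum_str_digits2(str):
--   temp = '0'
--   digits = []
--   for i in range(len(str)):
--     if str[i].isdigit():
--       temp += str[i]
--     else:
--       digits.append(temp)
--       temp = '0'
--   # Add whatever remains in temp to account for last char in str being digit
--   return sum(int(digit) for digit in digits) + int(temp)
-- ===== SOURCE B (Python) =====
-- def sum_str_digits2(str):
--   # One pass with numeric accumulators: no string buffers, no list of groups.
--   total = 0
--   cur = 0
--   for ch in str: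
--     if ch.isdigit():
--       cur = cur * 10 + int(ch)
--     else:
--       total += cur
--       cur = 0
--   return total + cur
-- ===== Notes on version B (the rewrite author's own statement) =====
-- stated objective: faster
-- what changed: Replaces A's string-buffer state machine (accumulate zero-prefixed run strings into a list, then a second pass parsing each with int()) by a single pass keeping two integer accumulators, extending the current run's value arithmetically (cur = cur*10 + digit); no intermediate strings or list are built.
import Mathlib
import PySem

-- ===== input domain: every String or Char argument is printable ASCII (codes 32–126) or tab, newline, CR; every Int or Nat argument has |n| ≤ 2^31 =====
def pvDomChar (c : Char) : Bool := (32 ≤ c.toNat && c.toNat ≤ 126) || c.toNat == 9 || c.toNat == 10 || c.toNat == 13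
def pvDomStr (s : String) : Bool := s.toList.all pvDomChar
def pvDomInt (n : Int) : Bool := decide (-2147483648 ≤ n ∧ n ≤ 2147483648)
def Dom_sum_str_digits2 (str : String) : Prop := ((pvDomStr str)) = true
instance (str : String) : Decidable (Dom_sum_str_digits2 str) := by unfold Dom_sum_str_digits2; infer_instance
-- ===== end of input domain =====

-- B replaces A's string-buffer state machine (list of '0'+run strings, parsed with int() in a
-- second pass) by one pass with two integer accumulators (simpler; return value only, no mutation).

-- ===== PORT A =====
-- int(s): hand-ported decimal parse; exact here because in A every string fed to int() is
-- '0' followed by characters accepted by str.isdigit(), i.e. (on the ASCII domain) '0'..'9'.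
def pvIntOfDigits (cs : List Char) : Int :=
  cs.foldl (fun a c => a * 10 + ((c.toNat : Int) - 48)) 0

def sum_str_digits2 (str : String) : Int :=
  let st := str.toList.foldl
    (fun (st : List Char × List (List Char)) c =>
      if PySem.Chars.isdigit c then (st.1 ++ [c], st.2)
      else (['0'], st.2 ++ [st.1]))
    (['0'], ([] : List (List Char)))
  st.2.foldl (fun a d => a + pvIntOfDigits d) 0 + pvIntOfDigits st.1

-- ===== PORT B =====
def sum_str_digits2_alt (str : String) : Int :=
  let st := str.toList.foldl
    (fun (st : Int × Int) c =>
      if PySem.Chars.isdigit c then (st.1, st.2 * 10 + ((c.toNat : Int) - 48))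
      else (st.1 + st.2, 0))
    ((0 : Int), (0 : Int))
  st.1 + st.2

-- ===== PRECONDITION & SPEC =====
def Spec_sum_str_digits2 (str : String) (out : Int) : Prop := out = sum_str_digits2_alt str
instance (str : String) (out : Int) : Decidable (Spec_sum_str_digits2 str out) := by unfold Spec_sum_str_digits2; infer_instance

-- ===== CLAIM (what is proved, stated in full; the proofs are below) =====
def Claim_equal_sum_str_digits2 : Prop := ∀ (str : String), Dom_sum_str_digits2 str → Spec_sum_str_digits2 str (sum_str_digits2 str)

-- ===== LEMMAS AND PROOFS =====

-- The abstraction from A's state (temp string, list of group strings) to B's state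
-- (running total, value of the current group).
def pvAbs (st : List Char × List (List Char)) : Int × Int :=
  (st.2.foldl (fun a d => a + pvIntOfDigits d) 0, pvIntOfDigits st.1)

theorem pvAbs_step (st : List Char × List (List Char)) (c : Char) :
    pvAbs (if PySem.Chars.isdigit c then (st.1 ++ [c], st.2) else (['0'], st.2 ++ [st.1]))
      = (if PySem.Chars.isdigit c then (pvAbs st).1
           else (pvAbs st).1 + (pvAbs st).2,
         if PySem.Chars.isdigit c then (pvAbs st).2 * 10 + ((c.toNat : Int) - 48) else 0) := by
  by_cases h : PySem.Chars.isdigit c = true <;>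
    simp [h, pvAbs, List.foldl_append, pvIntOfDigits]

theorem pvAbs_foldl (cs : List Char) (st : List Char × List (List Char)) :
    pvAbs (cs.foldl
        (fun st c => if PySem.Chars.isdigit c then (st.1 ++ [c], st.2) else (['0'], st.2 ++ [st.1])) st)
      = cs.foldl
        (fun (st : Int × Int) c =>
          if PySem.Chars.isdigit c then (st.1, st.2 * 10 + ((c.toNat : Int) - 48))
          else (st.1 + st.2, 0)) (pvAbs st) := by
  induction cs generalizing st with
  | nil => rfl
  | cons c cs ih =>
      simp only [List.foldl_cons, ih]
      congr 1
      rw [pvAbs_step]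
      by_cases h : PySem.Chars.isdigit c = true <;> simp [h]

-- ===== VERDICT (by name: the statement is the Claim_ definition above) =====
theorem sum_str_digits2_spec : Claim_equal_sum_str_digits2 := by
  intro str _
  unfold Spec_sum_str_digits2 sum_str_digits2 sum_str_digits2_alt
  have h := pvAbs_foldl str.toList (['0'], ([] : List (List Char)))
  have h0 : pvAbs (['0'], ([] : List (List Char))) = ((0 : Int), (0 : Int)) := by
    simp [pvAbs, pvIntOfDigits]
  rw [h0] at h
  simp only [pvAbs] at h
  rw [← h]
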